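-- pv_equiv track=rewrite | github.com/mcherif004/Recuperacion | 1Programacion/Simulacro Examen/Examenes/Examen_r/examen1_lib.py | ordenar_palabras
-- ===== SOURCE A (Python) =====
-- def ordenar_palabras(lista):
--     listado_ordenado =[["", "", ""], ["", "", ""], ["", "", ""]] # Inicializo una matriz
--     facil = 0  # Uso estos contadores para saber la columna de la matriz
--     mediano = 0
--     dificil = 0
--     for i in lista: # Bucle para recorrer la lista inicial e ir asignando las palabras a las distintas posiciones
--                     # de la matriz
--         if len(i) <= 4:
--             listado_ordenado[0][facil] = i # La fila la se por el nivel de dificultad y el contador para la columna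
--             facil += 1
--         elif len(i) >= 5 and (len(i) <= 7):
--             listado_ordenado[1][mediano] = i
--             mediano += 1
--         else:
--             listado_ordenado[2][dificil] = i
--             dificil += 1
--     return listado_ordenado # Devuelvo el valor de la lista ordenada
-- ===== SOURCE B (Python) =====
-- def ordenar_palabras(lista):
--     def fila(pred):
--         bucket = [w for w in lista if pred(w)]
--         return (bucket + ["", "", ""])[:3]
--     return [fila(lambda w: len(w) <= 4),
--             fila(lambda w: 5 <= len(w) <= 7),
--             fila(lambda w: len(w) > 7)]
-- ===== Notes on version B (the rewrite author's own statement) =====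
-- stated objective: simpler
-- what changed: Replaces A's single pass that mutates a 3x3 matrix under three manual column counters by three independent filter passes: each result row is built declaratively as the words of that difficulty padded with empty strings and truncated to 3, with no mutation and no counters.
import Mathlib
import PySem

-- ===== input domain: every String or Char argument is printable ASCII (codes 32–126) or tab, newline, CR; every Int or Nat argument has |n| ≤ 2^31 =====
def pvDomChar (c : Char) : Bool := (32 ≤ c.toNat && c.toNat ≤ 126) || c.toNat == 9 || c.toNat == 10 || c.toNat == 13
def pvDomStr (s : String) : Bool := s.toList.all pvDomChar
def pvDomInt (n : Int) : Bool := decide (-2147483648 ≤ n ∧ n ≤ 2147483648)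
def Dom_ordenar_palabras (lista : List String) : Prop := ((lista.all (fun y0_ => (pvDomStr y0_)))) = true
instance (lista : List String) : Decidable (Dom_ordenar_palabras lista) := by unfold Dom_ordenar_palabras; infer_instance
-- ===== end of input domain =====

-- B replaces A's single mutating pass over a 3x3 matrix with three manual counters by
-- three independent filter passes (each row = words of that difficulty, padded and
-- truncated to 3); equivalence is over Pre_, which excludes the inputs on which A raises
-- IndexError.

-- ===== PORT A =====
-- In-range assignment 'row[c] = i' is List.set (exact when c < row length; Pre_ excludes
-- the out-of-range case, where Python raises IndexError).
def ordenar_palabras (lista : List String) : List (List String) :=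
  (lista.foldl
    (fun (st : List (List String) × Nat × Nat × Nat) (i : String) =>
      let m := st.1; let facil := st.2.1; let mediano := st.2.2.1; let dificil := st.2.2.2
      if PySem.Str.len i ≤ 4 then
        (m.set 0 ((m.getD 0 []).set facil i), facil + 1, mediano, dificil)
      else if 5 ≤ PySem.Str.len i ∧ PySem.Str.len i ≤ 7 then
        (m.set 1 ((m.getD 1 []).set mediano i), facil, mediano + 1, dificil)
      else
        (m.set 2 ((m.getD 2 []).set dificil i), facil, mediano, dificil + 1))
    ([["", "", ""], ["", "", ""], ["", "", ""]], 0, 0, 0)).1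

-- ===== PORT B =====
-- fila(pred) = ([w for w in lista if pred(w)] + ["","",""])[:3]
def pvFila (lista : List String) (pred : String → Bool) : List String :=
  ((lista.filter pred) ++ ["", "", ""]).take 3

def ordenar_palabras_alt (lista : List String) : List (List String) :=
  [pvFila lista (fun w => PySem.Str.len w ≤ 4),
   pvFila lista (fun w => 5 ≤ PySem.Str.len w && PySem.Str.len w ≤ 7),
   pvFila lista (fun w => 7 < PySem.Str.len w)]

-- ===== PRECONDITION & SPEC =====
-- Pre_ excludes exactly the inputs on which A raises IndexError: some difficulty bucket
-- holds more than the 3 words its fixed-size matrix row can store.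
def Pre_ordenar_palabras (lista : List String) : Prop :=
  lista.countP (fun w => PySem.Str.len w ≤ 4) ≤ 3 ∧
  lista.countP (fun w => 5 ≤ PySem.Str.len w ∧ PySem.Str.len w ≤ 7) ≤ 3 ∧
  lista.countP (fun w => 8 ≤ PySem.Str.len w) ≤ 3
instance (lista : List String) : Decidable (Pre_ordenar_palabras lista) := by
  unfold Pre_ordenar_palabras; infer_instance

def pvWitness_ordenar_palabras : List String := ["sol", "palabra", "dificilisima", "mar"]

def Spec_ordenar_palabras (lista : List String) (out : List (List String)) : Prop := out = ordenar_palabras_alt lista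
instance (lista : List String) (out : List (List String)) : Decidable (Spec_ordenar_palabras lista out) := by unfold Spec_ordenar_palabras; infer_instance

-- ===== CLAIM (what is proved, stated in full; the proofs are below) =====
def Claim_equal_ordenar_palabras : Prop := ∀ (lista : List String), Dom_ordenar_palabras lista → Pre_ordenar_palabras lista → Spec_ordenar_palabras lista (ordenar_palabras lista)

-- ===== LEMMAS AND PROOFS =====

-- pad a bucket with empty strings to length 3 (proof-internal normal form)
def pvPad3 (b : List String) : List String := b ++ List.replicate (3 - b.length) ""

-- setting the cell just past a bucket of length n < 3 in its padded row = appending to the bucket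
lemma pad3_set (b : List String) (w : String) (h : b.length < 3) :
    (pvPad3 b).set b.length w = pvPad3 (b ++ [w]) := by
  have hr : 3 - b.length = (3 - (b.length + 1)) + 1 := by omega
  simp [pvPad3, List.set_append, hr, List.replicate_succ]

-- for a bucket of at most 3 words, pad-to-3 = append three blanks then take 3
lemma pad3_eq_take (b : List String) (h : b.length ≤ 3) :
    pvPad3 b = (b ++ ["", "", ""]).take 3 := by
  rcases b with _ | ⟨a, _ | ⟨c, _ | ⟨d, _ | ⟨e, t⟩⟩⟩⟩ <;>
    simp only [List.length_cons, List.length_nil] at h ⊢ <;>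
    first
      | omega
      | simp [pvPad3, List.replicate]

-- A's fold, run from padded buckets, equals padding the buckets extended by an
-- accumulator-style bucketing fold (provided no bucket overflows row length 3)
lemma main_invariant (rest : List String) (f m d : List String)
    (hf : f.length + rest.countP (fun w => PySem.Str.len w ≤ 4) ≤ 3)
    (hm : m.length + rest.countP (fun w => decide (5 ≤ PySem.Str.len w ∧ PySem.Str.len w ≤ 7)) ≤ 3)
    (hd : d.length + rest.countP (fun w => 8 ≤ PySem.Str.len w) ≤ 3) :
    (rest.foldl
      (fun (st : List (List String) × Nat × Nat × Nat) (i : String) =>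
        if PySem.Str.len i ≤ 4 then
          (st.1.set 0 ((st.1.getD 0 []).set st.2.1 i), st.2.1 + 1, st.2.2.1, st.2.2.2)
        else if 5 ≤ PySem.Str.len i ∧ PySem.Str.len i ≤ 7 then
          (st.1.set 1 ((st.1.getD 1 []).set st.2.2.1 i), st.2.1, st.2.2.1 + 1, st.2.2.2)
        else
          (st.1.set 2 ((st.1.getD 2 []).set st.2.2.2 i), st.2.1, st.2.2.1, st.2.2.2 + 1))
      ([pvPad3 f, pvPad3 m, pvPad3 d], f.length, m.length, d.length)).1
    =
    (fun bs : List String × List String × List String =>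
        [pvPad3 bs.1, pvPad3 bs.2.1, pvPad3 bs.2.2])
      (rest.foldl
        (fun (st : List String × List String × List String) (w : String) =>
          if PySem.Str.len w ≤ 4 then (st.1 ++ [w], st.2.1, st.2.2)
          else if PySem.Str.len w ≤ 7 then (st.1, st.2.1 ++ [w], st.2.2)
          else (st.1, st.2.1, st.2.2 ++ [w]))
        (f, m, d)) := by
  induction rest generalizing f m d with
  | nil => simp
  | cons w ws ih =>
    simp only [List.countP_cons] at hf hm hd
    by_cases h4 : PySem.Str.len w ≤ 4
    · have e2 : ¬(5 ≤ PySem.Str.len w ∧ PySem.Str.len w ≤ 7) := by omega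
      have e3 : ¬(8 ≤ PySem.Str.len w) := by omega
      simp only [h4, e2, e3, decide_true, decide_false, if_true, if_false] at hf hm hd
      have hf3 : f.length < 3 := by omega
      simp only [List.foldl_cons, if_pos h4]
      rw [show ([pvPad3 f, pvPad3 m, pvPad3 d].set 0 (([pvPad3 f, pvPad3 m, pvPad3 d].getD 0 []).set f.length w)) = [pvPad3 (f ++ [w]), pvPad3 m, pvPad3 d] by
        simp [List.set, List.getD, pad3_set f w hf3]]
      have := ih (f ++ [w]) m d
        (by simp only [List.length_append, List.length_cons, List.length_nil]; omega)
        (by omega) (by omega)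
      simpa using this
    · have h5 : 5 ≤ PySem.Str.len w := by omega
      by_cases h7 : PySem.Str.len w ≤ 7
      · have e2 : 5 ≤ PySem.Str.len w ∧ PySem.Str.len w ≤ 7 := ⟨h5, h7⟩
        have e3 : ¬(8 ≤ PySem.Str.len w) := by omega
        simp only [h4, e2, e3, decide_true, decide_false, if_true, if_false,
          and_self] at hf hm hd
        have hm3 : m.length < 3 := by omega
        simp only [List.foldl_cons, if_neg h4, if_pos e2, if_pos h7]
        rw [show ([pvPad3 f, pvPad3 m, pvPad3 d].set 1 (([pvPad3 f, pvPad3 m, pvPad3 d].getD 1 []).set m.length w)) = [pvPad3 f, pvPad3 (m ++ [w]), pvPad3 d] by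
          simp [List.set, List.getD, pad3_set m w hm3]]
        have := ih f (m ++ [w]) d (by omega)
          (by simp only [List.length_append, List.length_cons, List.length_nil]; omega)
          (by omega)
        simpa using this
      · have e2 : ¬(5 ≤ PySem.Str.len w ∧ PySem.Str.len w ≤ 7) := by omega
        have e3 : 8 ≤ PySem.Str.len w := by omega
        simp only [h4, e2, e3, decide_true, decide_false, if_true, if_false] at hf hm hd
        have hd3 : d.length < 3 := by omega
        simp only [List.foldl_cons, if_neg h4, if_neg e2, if_neg h7]
        rw [show ([pvPad3 f, pvPad3 m, pvPad3 d].set 2 (([pvPad3 f, pvPad3 m, pvPad3 d].getD 2 []).set d.length w)) = [pvPad3 f, pvPad3 m, pvPad3 (d ++ [w])] by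
          simp [List.set, List.getD, pad3_set d w hd3]]
        have := ih f m (d ++ [w]) (by omega) (by omega)
          (by simp only [List.length_append, List.length_cons, List.length_nil]; omega)
        simpa using this

-- the accumulator bucketing fold computes the three filters of B
lemma buckets_eq_filters (rest : List String) (f m d : List String) :
    (rest.foldl
      (fun (st : List String × List String × List String) (w : String) =>
        if PySem.Str.len w ≤ 4 then (st.1 ++ [w], st.2.1, st.2.2)
        else if PySem.Str.len w ≤ 7 then (st.1, st.2.1 ++ [w], st.2.2)
        else (st.1, st.2.1, st.2.2 ++ [w]))
      (f, m, d))
    = (f ++ rest.filter (fun w => PySem.Str.len w ≤ 4),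
       m ++ rest.filter (fun w => 5 ≤ PySem.Str.len w && PySem.Str.len w ≤ 7),
       d ++ rest.filter (fun w => 7 < PySem.Str.len w)) := by
  induction rest generalizing f m d with
  | nil => simp
  | cons w ws ih =>
    simp only [List.foldl_cons, List.filter_cons, Bool.and_eq_true, decide_eq_true_eq]
    by_cases h4 : PySem.Str.len w ≤ 4
    · have e2 : ¬(5 ≤ PySem.Str.len w ∧ PySem.Str.len w ≤ 7) := by omega
      have e3 : ¬(7 < PySem.Str.len w) := by omega
      simp only [h4, e2, e3, if_true, if_false]
      rw [ih]
      simp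
    · by_cases h7 : PySem.Str.len w ≤ 7
      · have e2 : 5 ≤ PySem.Str.len w ∧ PySem.Str.len w ≤ 7 := ⟨by omega, h7⟩
        have e3 : ¬(7 < PySem.Str.len w) := by omega
        simp only [h4, h7, e2, e3, if_true, if_false]
        rw [ih]
        simp
      · have e2 : ¬(5 ≤ PySem.Str.len w ∧ PySem.Str.len w ≤ 7) := by omega
        have e3 : 7 < PySem.Str.len w := by omega
        simp only [h4, h7, e2, e3, if_true, if_false]
        rw [ih]
        simp

-- ===== VERDICT (by name: the statement is the Claim_ definition above) =====
theorem ordenar_palabras_spec : Claim_equal_ordenar_palabras := by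
  intro lista _ hpre
  obtain ⟨hf, hm, hd⟩ := hpre
  unfold Spec_ordenar_palabras ordenar_palabras ordenar_palabras_alt
  have hinv := main_invariant lista [] [] [] (by simpa using hf)
      (by simpa using hm) (by simpa using hd)
  rw [buckets_eq_filters] at hinv
  have l1 : (lista.filter (fun w => PySem.Str.len w ≤ 4)).length ≤ 3 := by
    rw [← List.countP_eq_length_filter]; exact hf
  have l2 : (lista.filter (fun w => 5 ≤ PySem.Str.len w && PySem.Str.len w ≤ 7)).length ≤ 3 := by
    rw [← List.countP_eq_length_filter]
    have : lista.countP (fun w => 5 ≤ PySem.Str.len w && PySem.Str.len w ≤ 7)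
         = lista.countP (fun w => decide (5 ≤ PySem.Str.len w ∧ PySem.Str.len w ≤ 7)) := by
      apply List.countP_congr; intro w _; simp
    omega
  have l3 : (lista.filter (fun w => 7 < PySem.Str.len w)).length ≤ 3 := by
    rw [← List.countP_eq_length_filter]
    have : lista.countP (fun w => decide (7 < PySem.Str.len w))
         = lista.countP (fun w => decide (8 ≤ PySem.Str.len w)) := by
      apply List.countP_congr; intro w _; simp; omega
    omega
  have hfin := hinv
  simp only [List.nil_append] at hfin
  simp only [pvFila, ← pad3_eq_take _ l1, ← pad3_eq_take _ l2, ← pad3_eq_take _ l3]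
  simpa [pvPad3, List.replicate] using hfin
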